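-- pv_equiv track=rewrite | github.com/myioannis/University-Assignments | Search and Clustering in Latent Space/utilities.py | EMD_parse_CLA
-- ===== SOURCE A (Python) =====
-- def EMD_parse_CLA(argv):
--   data_Path = ''
--   queries_Path = ''
--   dataLabels_Path = ''
--   queryLabels_Path = ''
--   output_Path = ''
--   numData = 0
--   numQueries = 0
--   for index, argument in enumerate(argv):
--     if argument == '-d': data_Path = argv[index+1]
--     elif argument == '-l1': dataLabels_Path = argv[index+1]
--     elif argument == '-q': queries_Path = argv[index+1]
--     elif argument == '-l2': queryLabels_Path = argv[index+1]
--     elif argument == '-o': output_Path = argv[index+1]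
--     elif argument == '-nd': numData = argv[index+1]
--     elif argument == '-nq': numQueries = argv[index+1]
--   return data_Path,queries_Path,dataLabels_Path,queryLabels_Path,output_Path,int(numData),int(numQueries)
-- ===== SOURCE B (Python) =====
-- def EMD_parse_CLA(argv):
--     # For each flag, scan backwards and return the element after the first
--     # (i.e. rightmost) occurrence -- equivalent to A's forward overwrite.
--     def last_value(flag):
--         for i in range(len(argv) - 1, -1, -1):
--             if argv[i] == flag:
--                 return argv[i + 1]
--         return None
--
--     def text(flag):
--         v = last_value(flag)
--         return '' if v is None else v
--
--     def count(flag):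
--         v = last_value(flag)
--         return 0 if v is None else int(v)
--
--     return (text('-d'), text('-q'), text('-l1'), text('-l2'), text('-o'),
--             count('-nd'), count('-nq'))
-- ===== Notes on version B (the rewrite author's own statement) =====
-- stated objective: alternative
-- what changed: A makes one forward pass with a seven-branch if/elif chain overwriting seven locals; B instead answers each flag independently by a backward scan that returns the value after the rightmost occurrence of that flag (first match from the right = last match from the left).
import Mathlib
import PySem

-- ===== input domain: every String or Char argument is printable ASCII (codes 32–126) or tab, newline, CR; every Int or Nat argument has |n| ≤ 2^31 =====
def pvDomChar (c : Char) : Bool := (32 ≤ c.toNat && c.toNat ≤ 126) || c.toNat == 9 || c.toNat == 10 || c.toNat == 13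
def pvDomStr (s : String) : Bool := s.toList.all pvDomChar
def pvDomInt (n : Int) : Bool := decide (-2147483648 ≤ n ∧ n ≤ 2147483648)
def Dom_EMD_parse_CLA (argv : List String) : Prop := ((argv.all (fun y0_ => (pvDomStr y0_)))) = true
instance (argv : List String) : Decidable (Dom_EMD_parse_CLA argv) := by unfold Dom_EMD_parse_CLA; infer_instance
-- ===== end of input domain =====

-- B replaces A's single forward pass with a seven-branch overwrite chain by seven
-- independent backward scans (value after the rightmost occurrence of each flag);
-- same results (objective: alternative decomposition, not faster).

-- ===== PORT A =====
-- loop state: the seven locals of A; nd/nq are 'none' while still the int 0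
structure PvSt where
  d : String
  q : String
  l1 : String
  l2 : String
  o : String
  nd : Option String
  nq : Option String
deriving Repr, DecidableEq

-- body of A's for-loop: the if/elif chain, in A's branch order; argv[index+1]
-- is PySem.List.pyGetD (IndexError = out of range, excluded by Pre_)
def pvStepA (argv : List String) (st : PvSt) (p : Int × String) : PvSt :=
  if p.2 = "-d" then { st with d := PySem.List.pyGetD argv (p.1 + 1) "" }
  else if p.2 = "-l1" then { st with l1 := PySem.List.pyGetD argv (p.1 + 1) "" }
  else if p.2 = "-q" then { st with q := PySem.List.pyGetD argv (p.1 + 1) "" }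
  else if p.2 = "-l2" then { st with l2 := PySem.List.pyGetD argv (p.1 + 1) "" }
  else if p.2 = "-o" then { st with o := PySem.List.pyGetD argv (p.1 + 1) "" }
  else if p.2 = "-nd" then { st with nd := some (PySem.List.pyGetD argv (p.1 + 1) "") }
  else if p.2 = "-nq" then { st with nq := some (PySem.List.pyGetD argv (p.1 + 1) "") }
  else st

-- int(x) where x is either still the int 0 (none) or a string; ValueError excluded by Pre_
def pvIntOf (x : Option String) : Int :=
  match x with
  | none => 0
  | some s => (PySem.Int.ofStr? s).getD 0

def EMD_parse_CLA (argv : List String) : String × String × String × String × String × Int × Int :=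
  let st := (PySem.List.enumerate argv 0).foldl (pvStepA argv) ⟨"", "", "", "", "", none, none⟩
  (st.d, st.q, st.l1, st.l2, st.o, pvIntOf st.nd, pvIntOf st.nq)

-- ===== PORT B =====
-- B's last_value: for i in range(len(argv)-1, -1, -1): if argv[i] == flag: return argv[i+1]
-- transliterated as a countdown on the index (n+1 checks index n first)
def pvScanB (argv : List String) (flag : String) : Nat → Option String
  | 0 => none
  | n + 1 =>
    if PySem.List.pyGetD argv (n : Int) "" = flag then
      some (PySem.List.pyGetD argv ((n : Int) + 1) "")   -- argv[i+1]; IndexError excluded by Pre_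
    else pvScanB argv flag n

-- B's text(flag)
def pvTextB (argv : List String) (flag : String) : String :=
  (pvScanB argv flag argv.length).getD ""

-- B's count(flag)
def pvCountB (argv : List String) (flag : String) : Int :=
  match pvScanB argv flag argv.length with
  | none => 0
  | some s => (PySem.Int.ofStr? s).getD 0   -- int(v); ValueError excluded by Pre_

def EMD_parse_CLA_alt (argv : List String) : String × String × String × String × String × Int × Int :=
  (pvTextB argv "-d", pvTextB argv "-q", pvTextB argv "-l1", pvTextB argv "-l2",
   pvTextB argv "-o", pvCountB argv "-nd", pvCountB argv "-nq")

-- ===== PRECONDITION & SPEC =====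
-- value following the LAST occurrence of f (plain list lookup, used only by Pre_)
def pvValAfterLast : List String → String → Option String
  | [], _ => none
  | a :: t, f =>
    match pvValAfterLast t f with
    | some v => some v
    | none => if a = f then t.head? else none

def pvParses : Option String → Bool
  | none => true
  | some s => (PySem.Int.ofStr? s).isSome

-- Pre_ excludes exactly the inputs on which the Python A raises: a recognized flag as
-- the last element (IndexError on argv[index+1]) and a last '-nd'/'-nq' whose following
-- value is not parseable by int() (ValueError).
def Pre_EMD_parse_CLA (argv : List String) : Prop :=
  (∀ f ∈ ["-d", "-l1", "-q", "-l2", "-o", "-nd", "-nq"], argv.getLast? ≠ some f)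
  ∧ pvParses (pvValAfterLast argv "-nd") = true
  ∧ pvParses (pvValAfterLast argv "-nq") = true
instance (argv : List String) : Decidable (Pre_EMD_parse_CLA argv) := by
  unfold Pre_EMD_parse_CLA; infer_instance

def pvWitness_EMD_parse_CLA : List String := ["-d", "data.txt", "-nd", "17", "-q", "q.txt"]

def Spec_EMD_parse_CLA (argv : List String) (out : String × String × String × String × String × Int × Int) : Prop := out = EMD_parse_CLA_alt argv
instance (argv : List String) (out : String × String × String × String × String × Int × Int) : Decidable (Spec_EMD_parse_CLA argv out) := by unfold Spec_EMD_parse_CLA; infer_instance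

-- ===== CLAIM (what is proved, stated in full; the proofs are below) =====
def Claim_equal_EMD_parse_CLA : Prop := ∀ (argv : List String), Dom_EMD_parse_CLA argv → Pre_EMD_parse_CLA argv → Spec_EMD_parse_CLA argv (EMD_parse_CLA argv)

-- ===== LEMMAS AND PROOFS =====

-- index of the last pair in ps whose second component is f
def pvLastHit : List (Int × String) → String → Option Int
  | [], _ => none
  | (i, a) :: rest, f =>
    match pvLastHit rest f with
    | some j => some j
    | none => if a = f then some i else none

theorem pvLastHit_append_singleton (ps : List (Int × String)) (i : Int) (a f : String) :
    pvLastHit (ps ++ [(i, a)]) f = if a = f then some i else pvLastHit ps f := by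
  induction ps with
  | nil => simp [pvLastHit]
  | cons p ps ih =>
    obtain ⟨j, b⟩ := p
    simp only [List.cons_append, pvLastHit, ih]
    by_cases h : a = f
    · simp [h]
    · simp [h]

-- generic field lemma for A's fold
theorem pvFold_field {β : Type} (argv : List String) (get : PvSt → β) (wrap : String → β) (f : String)
    (hset : ∀ st i, get (pvStepA argv st (i, f)) = wrap (PySem.List.pyGetD argv (i + 1) ""))
    (hskip : ∀ st i a, a ≠ f → get (pvStepA argv st (i, a)) = get st) :
    ∀ (ps : List (Int × String)) (st : PvSt),
      get (ps.foldl (pvStepA argv) st) =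
        (match pvLastHit ps f with
         | none => get st
         | some i => wrap (PySem.List.pyGetD argv (i + 1) "")) := by
  intro ps
  induction ps with
  | nil => intro st; simp [pvLastHit]
  | cons p ps ih =>
    intro st
    obtain ⟨i, a⟩ := p
    simp only [List.foldl_cons]
    rw [ih]
    cases hlh : pvLastHit ps f with
    | some j => simp [pvLastHit, hlh]
    | none =>
      by_cases h : a = f
      · subst h; simp [pvLastHit, hlh, hset]
      · simp [pvLastHit, hlh, h, hskip st i a h]

-- B's backward scan computes the value after the last hit among the first n pairs
theorem pvScanB_eq (argv : List String) (f : String) :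
    ∀ n, n ≤ argv.length →
      pvScanB argv f n =
        (pvLastHit (PySem.List.enumerate (argv.take n) 0) f).map
          (fun i => PySem.List.pyGetD argv (i + 1) "") := by
  intro n
  induction n with
  | zero => intro _; simp [pvScanB, pvLastHit, PySem.List.enumerate_nil]
  | succ n ih =>
    intro h
    have hn : n < argv.length := by omega
    have htake : argv.take (n + 1) = argv.take n ++ [argv[n]] := by
      rw [List.take_add_one]; simp [List.getElem?_eq_getElem hn]
    have hlen : (argv.take n).length = n := by simp [Nat.min_eq_left (Nat.le_of_lt hn)]
    have henum : PySem.List.enumerate (argv.take (n + 1)) 0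
        = PySem.List.enumerate (argv.take n) 0 ++ [((n : Int), argv[n])] := by
      rw [htake, PySem.List.enumerate_append]
      simp [hlen, PySem.List.enumerate_cons, PySem.List.enumerate_nil]
    have hget : PySem.List.pyGetD argv (n : Int) "" = argv[n] := by
      simp [PySem.List.pyGetD_natCast, List.getD_eq_getElem?_getD, List.getElem?_eq_getElem hn]
    rw [henum, pvLastHit_append_singleton]
    by_cases hf : argv[n] = f
    · simp [pvScanB, hget, hf]
    · simp only [if_neg hf]
      simp [pvScanB, hget, hf, ih (Nat.le_of_lt hn)]

-- instantiations of pvFold_field for the seven fields, applied to the full enumerate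
theorem pvA_state (argv : List String) :
    let st := (PySem.List.enumerate argv 0).foldl (pvStepA argv) ⟨"", "", "", "", "", none, none⟩
    let v : Int → String := fun i => PySem.List.pyGetD argv (i + 1) ""
    let hit : String → Option Int := fun f => pvLastHit (PySem.List.enumerate argv 0) f
    st.d = ((hit "-d").map v).getD "" ∧
    st.q = ((hit "-q").map v).getD "" ∧
    st.l1 = ((hit "-l1").map v).getD "" ∧
    st.l2 = ((hit "-l2").map v).getD "" ∧
    st.o = ((hit "-o").map v).getD "" ∧
    st.nd = (hit "-nd").map v ∧
    st.nq = (hit "-nq").map v := by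
  have hd := pvFold_field argv (fun st => st.d) id "-d"
    (by intro st i; simp [pvStepA])
    (by intro st i a ha; simp only [pvStepA]; split_ifs <;> simp_all)
    (PySem.List.enumerate argv 0) ⟨"", "", "", "", "", none, none⟩
  have hq := pvFold_field argv (fun st => st.q) id "-q"
    (by intro st i; simp [pvStepA])
    (by intro st i a ha; simp only [pvStepA]; split_ifs <;> simp_all)
    (PySem.List.enumerate argv 0) ⟨"", "", "", "", "", none, none⟩
  have hl1 := pvFold_field argv (fun st => st.l1) id "-l1"
    (by intro st i; simp [pvStepA])
    (by intro st i a ha; simp only [pvStepA]; split_ifs <;> simp_all)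
    (PySem.List.enumerate argv 0) ⟨"", "", "", "", "", none, none⟩
  have hl2 := pvFold_field argv (fun st => st.l2) id "-l2"
    (by intro st i; simp [pvStepA])
    (by intro st i a ha; simp only [pvStepA]; split_ifs <;> simp_all)
    (PySem.List.enumerate argv 0) ⟨"", "", "", "", "", none, none⟩
  have ho := pvFold_field argv (fun st => st.o) id "-o"
    (by intro st i; simp [pvStepA])
    (by intro st i a ha; simp only [pvStepA]; split_ifs <;> simp_all)
    (PySem.List.enumerate argv 0) ⟨"", "", "", "", "", none, none⟩
  have hnd := pvFold_field argv (fun st => st.nd) some "-nd"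
    (by intro st i; simp [pvStepA])
    (by intro st i a ha; simp only [pvStepA]; split_ifs <;> simp_all)
    (PySem.List.enumerate argv 0) ⟨"", "", "", "", "", none, none⟩
  have hnq := pvFold_field argv (fun st => st.nq) some "-nq"
    (by intro st i; simp [pvStepA])
    (by intro st i a ha; simp only [pvStepA]; split_ifs <;> simp_all)
    (PySem.List.enumerate argv 0) ⟨"", "", "", "", "", none, none⟩
  refine ⟨?_, ?_, ?_, ?_, ?_, ?_, ?_⟩ <;>
    first
    | (rw [hd]; cases h : pvLastHit (PySem.List.enumerate argv 0) "-d" <;> simp [h])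
    | (rw [hq]; cases h : pvLastHit (PySem.List.enumerate argv 0) "-q" <;> simp [h])
    | (rw [hl1]; cases h : pvLastHit (PySem.List.enumerate argv 0) "-l1" <;> simp [h])
    | (rw [hl2]; cases h : pvLastHit (PySem.List.enumerate argv 0) "-l2" <;> simp [h])
    | (rw [ho]; cases h : pvLastHit (PySem.List.enumerate argv 0) "-o" <;> simp [h])
    | (rw [hnd]; cases h : pvLastHit (PySem.List.enumerate argv 0) "-nd" <;> simp [h])
    | (rw [hnq]; cases h : pvLastHit (PySem.List.enumerate argv 0) "-nq" <;> simp [h])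

theorem pvPorts_eq (argv : List String) : EMD_parse_CLA argv = EMD_parse_CLA_alt argv := by
  obtain ⟨hd, hq, hl1, hl2, ho, hnd, hnq⟩ := pvA_state argv
  have hscan : ∀ f, pvScanB argv f argv.length
      = (pvLastHit (PySem.List.enumerate argv 0) f).map
          (fun i => PySem.List.pyGetD argv (i + 1) "") := by
    intro f
    rw [pvScanB_eq argv f argv.length (le_refl _)]
    simp
  simp only [EMD_parse_CLA, EMD_parse_CLA_alt, pvTextB, pvCountB, hscan]
  rw [hd, hq, hl1, hl2, ho, hnd, hnq]
  cases h1 : pvLastHit (PySem.List.enumerate argv 0) "-nd" <;>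
    cases h2 : pvLastHit (PySem.List.enumerate argv 0) "-nq" <;>
      simp [pvIntOf, h1, h2]

-- ===== VERDICT (by name: the statement is the Claim_ definition above) =====
theorem EMD_parse_CLA_spec : Claim_equal_EMD_parse_CLA := by
  intro argv _ _
  unfold Spec_EMD_parse_CLA
  exact pvPorts_eq argv
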